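-- pv_equiv track=rewrite | github.com/aaronxyliu/Anonymous | crawler/2_get_version_files.py | select_file_for_each_version
-- ===== SOURCE A (Python) =====
-- def select_file_for_each_version(files, patten_dict):
--     # Return a single file path for each version
--     for pattern in patten_dict:
--         for filepath in files:
--             if valid_webjs(filepath):
--                 filename = filepath[filepath.rfind('/') + 1 :]
--                 filename_body = filename[: filename.find('.')].lower()
--                 if filename_body == pattern:
--                     return filepath
--     return None
--
-- def valid_webjs(filepath):
--     filepath = filepath.lower()
--     invalid_patterns = ['amd/', 'esm/', 'es6/', 'cjs/', '/amd', '/esm', '/es6', '/cjs', 'amd.', 'esm.', 'es6.', 'cjs.', '.amd', '.esm', '.es6', '.cjs']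
--     for pattern in invalid_patterns:
--         if pattern in filepath:
--             return False
--     return True
-- ===== SOURCE B (Python) =====
-- def valid_webjs(filepath):
--     fp = filepath.lower()
--     return not any(p in fp for p in
--                    ('amd/', 'esm/', 'es6/', 'cjs/', '/amd', '/esm', '/es6', '/cjs',
--                     'amd.', 'esm.', 'es6.', 'cjs.', '.amd', '.esm', '.es6', '.cjs'))
--
-- def select_file_for_each_version(files, patten_dict):
--     # one pass over files keeping a running best (lowest) pattern priority
--     prio = {}
--     for i, pattern in enumerate(patten_dict):
--         if pattern not in prio:
--             prio[pattern] = i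
--     best_idx = len(patten_dict)
--     best_path = None
--     for filepath in files:
--         if valid_webjs(filepath):
--             filename = filepath[filepath.rfind('/') + 1:]
--             filename_body = filename[: filename.find('.')].lower()
--             idx = prio.get(filename_body)
--             if idx is not None and idx < best_idx:
--                 best_idx = idx
--                 best_path = filepath
--     return best_path
-- ===== Notes on version B (the rewrite author's own statement) =====
-- stated objective: alternative
-- what changed: Replaced the pattern-major nested rescans (for each pattern in priority order, scan all files) by a first-occurrence priority map built once plus a single running-argmin pass over the files.
import Mathlib
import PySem

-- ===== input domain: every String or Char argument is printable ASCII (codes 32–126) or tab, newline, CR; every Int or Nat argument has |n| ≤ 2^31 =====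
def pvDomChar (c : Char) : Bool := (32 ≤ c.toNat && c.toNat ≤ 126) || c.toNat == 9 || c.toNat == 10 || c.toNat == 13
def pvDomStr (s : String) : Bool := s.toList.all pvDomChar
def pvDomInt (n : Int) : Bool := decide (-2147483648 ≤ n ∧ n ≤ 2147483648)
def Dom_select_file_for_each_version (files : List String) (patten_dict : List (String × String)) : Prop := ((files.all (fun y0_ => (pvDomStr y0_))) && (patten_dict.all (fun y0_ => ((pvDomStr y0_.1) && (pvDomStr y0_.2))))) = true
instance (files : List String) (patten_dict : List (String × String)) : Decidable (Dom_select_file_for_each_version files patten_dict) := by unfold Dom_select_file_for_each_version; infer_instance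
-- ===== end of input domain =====

-- B replaces A's pattern-major nested rescans by a first-occurrence priority map plus one running-argmin pass over the files (alternative decomposition, same results).

-- ===== PORT A =====
-- helpers shared by both ports (the Python module helper valid_webjs and the body-extraction expressions are identical in Source A and Source B)
def validWebjs (filepath : String) : Bool :=
  let fp := PySem.Str.lower filepath
  let invalid_patterns := ["amd/", "esm/", "es6/", "cjs/", "/amd", "/esm", "/es6", "/cjs", "amd.", "esm.", "es6.", "cjs.", ".amd", ".esm", ".es6", ".cjs"]
  !(invalid_patterns.any (fun p => PySem.Str.isIn p fp))

def filenameBody (filepath : String) : String :=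
  let filename := PySem.Str.slice filepath (some (PySem.Str.rfind filepath "/" + 1)) none
  PySem.Str.lower (PySem.Str.slice filename none (some (PySem.Str.find filename ".")))

-- A's inner 'for filepath in files' loop for one pattern
def pvAInner (files : List String) (pattern : String) : Option String :=
  match files with
  | [] => none
  | f :: rest => if validWebjs f && (filenameBody f == pattern) then some f else pvAInner rest pattern

def select_file_for_each_version (files : List String) (patten_dict : List (String × String)) : Option String :=
  match patten_dict with
  | [] => none
  | (pattern, _) :: rest =>
    match pvAInner files pattern with
    | some f => some f
    | none => select_file_for_each_version files rest

-- ===== PORT B =====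
def pvBStep (prio : PySem.Dict String Int) (st : Int × Option String) (f : String) : Int × Option String :=
  if validWebjs f then
    match prio.get? (filenameBody f) with
    | some i => if i < st.1 then (i, some f) else st
    | none => st
  else st

def select_file_for_each_version_alt (files : List String) (patten_dict : List (String × String)) : Option String :=
  let prio : PySem.Dict String Int :=
    (PySem.List.enumerate (patten_dict.map Prod.fst) 0).foldl
      (fun d ip => if d.contains ip.2 then d else d.insert ip.2 ip.1) PySem.Dict.empty
  (files.foldl (pvBStep prio) ((patten_dict.length : Int), none)).2

-- ===== PRECONDITION & SPEC =====
def Spec_select_file_for_each_version (files : List String) (patten_dict : List (String × String)) (out : Option String) : Prop := out = select_file_for_each_version_alt files patten_dict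
instance (files : List String) (patten_dict : List (String × String)) (out : Option String) : Decidable (Spec_select_file_for_each_version files patten_dict out) := by unfold Spec_select_file_for_each_version; infer_instance

-- ===== CLAIM (what is proved, stated in full; the proofs are below) =====
def Claim_equal_select_file_for_each_version : Prop := ∀ (files : List String) (patten_dict : List (String × String)), Dom_select_file_for_each_version files patten_dict → Spec_select_file_for_each_version files patten_dict (select_file_for_each_version files patten_dict)

-- ===== LEMMAS AND PROOFS =====

-- rank of a file: index of the first pattern its body matches (none if invalid or unmatched)
def pvRank (ks : List String) (f : String) : Option Nat :=
  if validWebjs f then PySem.List.index? ks (filenameBody f) else none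

def pvRanks (ks : List String) (files : List String) : List Nat :=
  files.filterMap (pvRank ks)

-- common reference: first file attaining the minimal rank
def pvRef (files : List String) (ks : List String) : Option String :=
  match (pvRanks ks files).min? with
  | none => none
  | some i => files.find? (fun f => pvRank ks f == some i)

theorem pv_find?_congr {α : Type} (p q : α → Bool) (l : List α) (h : ∀ x ∈ l, p x = q x) :
    l.find? p = l.find? q := by
  induction l with
  | nil => rfl
  | cons x xs ih =>
    have hx : p x = q x := h x (by simp)
    by_cases hq : q x = true
    · rw [List.find?_cons_of_pos hq, List.find?_cons_of_pos (by rw [hx, hq])]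
    · have hq' : q x = false := by simpa using hq
      rw [List.find?_cons_of_neg (by simp [hx, hq']), List.find?_cons_of_neg (by simp [hq']),
        ih (fun y hy => h y (by simp [hy]))]

theorem pv_min?_map_succ (l : List Nat) : (l.map (· + 1)).min? = l.min?.map (· + 1) := by
  cases hm : l.min? with
  | none =>
    have : l = [] := by simpa using hm
    subst this; rfl
  | some m =>
    obtain ⟨hmem, hmin⟩ := List.min?_eq_some_iff.mp hm
    refine List.min?_eq_some_iff.mpr ⟨List.mem_map.mpr ⟨m, hmem, rfl⟩, ?_⟩
    intro b hb
    obtain ⟨a, ha, rfl⟩ := List.mem_map.mp hb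
    exact Nat.succ_le_succ (hmin a ha)

theorem pv_prio_get (ks : List String) : ∀ (off : Int) (d : PySem.Dict String Int) (s : String),
    ((PySem.List.enumerate ks off).foldl
        (fun d ip => if d.contains ip.2 then d else d.insert ip.2 ip.1) d).get? s
      = if d.contains s then d.get? s
        else (PySem.List.index? ks s).map (fun n : Nat => off + (n : Int)) := by
  induction ks with
  | nil =>
    intro off d s
    rw [PySem.List.enumerate_nil]
    simp only [List.foldl_nil]
    by_cases h : d.contains s = true
    · simp [h]
    · have h' : d.contains s = false := by simpa using h
      have hg : d.get? s = none := by
        have hc := PySem.Dict.contains_eq_isSome_get? (d := d) (k := s)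
        rw [h'] at hc
        exact Option.not_isSome_iff_eq_none.mp (by simp [← hc])
      simp [h', hg, PySem.List.index?_eq_idxOf?]
  | cons k ks ih =>
    intro off d s
    rw [PySem.List.enumerate_cons]
    rw [List.foldl_cons]
    rw [ih]
    by_cases hsk : s = k
    · subst hsk
      by_cases hc : d.contains s = true
      · simp [hc]
      · have h' : d.contains s = false := by simpa using hc
        rw [PySem.List.index?_cons_self]
        simp [h', PySem.Dict.contains_insert_self, PySem.Dict.get?_insert_self]
    · have hstep_contains :
          ((if d.contains k then d else d.insert k off) : PySem.Dict String Int).contains s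
            = d.contains s := by
        split_ifs with h
        · rfl
        · rw [PySem.Dict.contains_insert]; simp [hsk]
      have hstep_get :
          ((if d.contains k then d else d.insert k off) : PySem.Dict String Int).get? s
            = d.get? s := by
        split_ifs with h
        · rfl
        · exact PySem.Dict.get?_insert_of_ne _ _ hsk
      simp only [hstep_contains, hstep_get]
      rw [PySem.List.index?_cons_of_ne _ (Ne.symm hsk)]
      by_cases hc : d.contains s = true
      · simp [hc]
      · have h' : d.contains s = false := by simpa using hc
        simp only [h', Bool.false_eq_true, if_false]
        cases hidx : PySem.List.index? ks s with
        | none => rfl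
        | some n =>
          simp only [Option.map_some]
          congr 1
          push_cast
          ring

theorem pvAInner_eq_find? (p : String) (files : List String) :
    pvAInner files p = files.find? (fun f => validWebjs f && (filenameBody f == p)) := by
  induction files with
  | nil => rfl
  | cons f rest ih =>
    cases h : (validWebjs f && (filenameBody f == p)) <;> simp [pvAInner, h, ih]

theorem pvRank_cons_zero (p : String) (ks : List String) (f : String) :
    (pvRank (p :: ks) f == some 0) = (validWebjs f && (filenameBody f == p)) := by
  unfold pvRank
  by_cases hv : validWebjs f = true
  · simp only [hv, if_true, Bool.true_and]
    by_cases hb : filenameBody f = p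
    · rw [hb, PySem.List.index?_cons_self]
      simp
    · rw [PySem.List.index?_cons_of_ne _ (Ne.symm hb)]
      cases PySem.List.index? ks (filenameBody f) <;> simp [hb]
  · simp [hv]

theorem pvRank_cons_shift (p : String) (ks : List String) (f : String)
    (h : ¬ (validWebjs f = true ∧ filenameBody f = p)) :
    pvRank (p :: ks) f = (pvRank ks f).map (· + 1) := by
  unfold pvRank
  by_cases hv : validWebjs f = true
  · have hb : filenameBody f ≠ p := fun hb => h ⟨hv, hb⟩
    simp only [hv, if_true]
    exact PySem.List.index?_cons_of_ne _ (Ne.symm hb)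
  · simp [hv]

theorem pv_find?_pred {α : Type} (p : α → Bool) (l : List α) (a : α) (h : l.find? p = some a) :
    p a = true := List.find?_some h

theorem pvA_eq_ref (files : List String) : ∀ (pd : List (String × String)),
    select_file_for_each_version files pd = pvRef files (pd.map Prod.fst) := by
  intro pd
  induction pd with
  | nil =>
    have hranks : pvRanks [] files = [] := by
      refine List.filterMap_eq_nil_iff.mpr ?_
      intro f _
      simp [pvRank, PySem.List.index?_eq_idxOf?]
    simp [select_file_for_each_version, pvRef, hranks]
  | cons pr rest ih =>
    obtain ⟨p, v⟩ := pr
    cases hfind : files.find? (fun f => validWebjs f && (filenameBody f == p)) with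
    | some f =>
      have hA : select_file_for_each_version files ((p, v) :: rest) = some f := by
        simp [select_file_for_each_version, pvAInner_eq_find?, hfind]
      have hmemf : f ∈ files := List.mem_of_find?_eq_some hfind
      have hpf : (validWebjs f && (filenameBody f == p)) = true :=
        pv_find?_pred (fun f => validWebjs f && (filenameBody f == p)) files f hfind
      have hr0 : pvRank (p :: rest.map Prod.fst) f = some 0 := by
        have hz := pvRank_cons_zero p (rest.map Prod.fst) f
        rw [hpf] at hz
        exact eq_of_beq hz
      have h0mem : 0 ∈ pvRanks (p :: rest.map Prod.fst) files :=
        List.mem_filterMap.mpr ⟨f, hmemf, hr0⟩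
      have hmin : (pvRanks (p :: rest.map Prod.fst) files).min? = some 0 :=
        List.min?_eq_some_iff.mpr ⟨h0mem, fun b _ => Nat.zero_le b⟩
      have href : pvRef files (p :: rest.map Prod.fst) = some f := by
        unfold pvRef
        rw [hmin]
        show files.find? (fun f => pvRank (p :: rest.map Prod.fst) f == some 0) = some f
        rw [pv_find?_congr (fun f => pvRank (p :: rest.map Prod.fst) f == some 0)
          (fun f => validWebjs f && (filenameBody f == p)) files
          (fun x _ => pvRank_cons_zero p (rest.map Prod.fst) x)]
        exact hfind
      rw [hA]
      exact href.symm
    | none =>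
      have hA : select_file_for_each_version files ((p, v) :: rest)
          = select_file_for_each_version files rest := by
        simp [select_file_for_each_version, pvAInner_eq_find?, hfind]
      rw [hA, ih]
      simp only [List.map_cons]
      have hnone := List.find?_eq_none.mp hfind
      have hshift : ∀ x ∈ files, pvRank (p :: rest.map Prod.fst) x
          = (pvRank (rest.map Prod.fst) x).map (· + 1) := by
        intro x hx
        apply pvRank_cons_shift
        rintro ⟨h1, h2⟩
        exact hnone x hx (by simp [h1, h2])
      have hranks : pvRanks (p :: rest.map Prod.fst) files
          = (pvRanks (rest.map Prod.fst) files).map (· + 1) := by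
        unfold pvRanks
        rw [List.filterMap_congr hshift]
        exact (List.map_filterMap ..).symm
      unfold pvRef
      rw [hranks, pv_min?_map_succ]
      cases hm : (pvRanks (rest.map Prod.fst) files).min? with
      | none => rfl
      | some i =>
        show files.find? (fun f => pvRank (rest.map Prod.fst) f == some i)
            = match (some i).map (· + 1) with
              | none => none
              | some i => files.find? (fun f => pvRank (p :: rest.map Prod.fst) f == some i)
        show files.find? (fun f => pvRank (rest.map Prod.fst) f == some i)
            = files.find? (fun f => pvRank (p :: rest.map Prod.fst) f == some (i + 1))
        apply pv_find?_congr
        intro x hx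
        rw [hshift x hx]
        cases pvRank (rest.map Prod.fst) x with
        | none => simp
        | some n => simp

theorem pvB_fold (prio : PySem.Dict String Int) (ks : List String)
    (hp : ∀ s, prio.get? s = (PySem.List.index? ks s).map (fun n : Nat => (n : Int))) :
    ∀ (files : List String) (bi : Int) (bp : Option String),
    files.foldl (pvBStep prio) (bi, bp) =
      match ((pvRanks ks files).filter (fun i : Nat => decide ((i : Int) < bi))).min? with
      | none => (bi, bp)
      | some i => ((i : Int), files.find? (fun f => pvRank ks f == some i)) := by
  intro files
  induction files with
  | nil => intro bi bp; simp [pvRanks]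
  | cons f rest ih =>
    intro bi bp
    rw [List.foldl_cons]
    have hstep : pvBStep prio (bi, bp) f =
        match pvRank ks f with
        | some j => if (j : Int) < bi then ((j : Int), some f) else (bi, bp)
        | none => (bi, bp) := by
      unfold pvBStep pvRank
      by_cases hv : validWebjs f = true
      · simp only [hv, if_true]
        rw [hp]
        cases PySem.List.index? ks (filenameBody f) <;> simp
      · simp [hv]
    cases hr : pvRank ks f with
    | none =>
      rw [hr] at hstep
      have hstep' : pvBStep prio (bi, bp) f = (bi, bp) := by rw [hstep]
      rw [hstep', ih bi bp]
      have hranks : pvRanks ks (f :: rest) = pvRanks ks rest := by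
        simp [pvRanks, hr]
      rw [hranks]
      cases hm : ((pvRanks ks rest).filter (fun i : Nat => decide ((i : Int) < bi))).min? with
      | none => rfl
      | some i =>
        show ((i : Int), List.find? (fun f => pvRank ks f == some i) rest)
            = ((i : Int), List.find? (fun f => pvRank ks f == some i) (f :: rest))
        rw [List.find?_cons_of_neg (by simp [hr])]
    | some j =>
      rw [hr] at hstep
      have hranks : pvRanks ks (f :: rest) = j :: pvRanks ks rest := by
        simp [pvRanks, hr]
      rw [hranks]
      by_cases hlt : (j : Int) < bi
      · have hstep' : pvBStep prio (bi, bp) f = ((j : Int), some f) := by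
          rw [hstep]; exact if_pos hlt
        rw [hstep', ih (j : Int) (some f)]
        have hfilter : (j :: pvRanks ks rest).filter (fun i : Nat => decide ((i : Int) < bi))
            = j :: (pvRanks ks rest).filter (fun i : Nat => decide ((i : Int) < bi)) := by
          simp [hlt]
        rw [hfilter]
        cases hm2 : ((pvRanks ks rest).filter
            (fun i : Nat => decide ((i : Int) < (j : Int)))).min? with
        | some i =>
          obtain ⟨hi_mem, hi_min⟩ := List.min?_eq_some_iff.mp hm2
          have hi_mem' : i ∈ pvRanks ks rest ∧ (i : Int) < (j : Int) := by
            have := List.mem_filter.mp hi_mem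
            exact ⟨this.1, by simpa using this.2⟩
          have hij : i < j := by exact_mod_cast hi_mem'.2
          have hmin1 : (j :: (pvRanks ks rest).filter
              (fun i : Nat => decide ((i : Int) < bi))).min? = some i := by
            refine List.min?_eq_some_iff.mpr ⟨?_, ?_⟩
            · refine List.mem_cons.mpr (Or.inr ?_)
              refine List.mem_filter.mpr ⟨hi_mem'.1, ?_⟩
              simp only [decide_eq_true_eq]
              omega
            · intro b hb
              rcases List.mem_cons.mp hb with hb | hb
              · omega
              · have hb' := List.mem_filter.mp hb
                by_cases hbj : (b : Int) < (j : Int)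
                · exact hi_min b (List.mem_filter.mpr ⟨hb'.1, by simpa using hbj⟩)
                · have : j ≤ b := by exact_mod_cast not_lt.mp hbj
                  omega
          rw [hmin1]
          show ((i : Int), List.find? (fun f => pvRank ks f == some i) rest)
              = ((i : Int), List.find? (fun f => pvRank ks f == some i) (f :: rest))
          rw [List.find?_cons_of_neg (by simp [hr, beq_iff_eq]; omega)]
        | none =>
          have hempty : ∀ b ∈ pvRanks ks rest, ¬ ((b : Int) < (j : Int)) := by
            intro b hb hbj
            have hnil : (pvRanks ks rest).filter
                (fun i : Nat => decide ((i : Int) < (j : Int))) = [] := by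
              simpa using hm2
            have hmem : b ∈ (pvRanks ks rest).filter
                (fun i : Nat => decide ((i : Int) < (j : Int))) :=
              List.mem_filter.mpr ⟨hb, by simpa using hbj⟩
            rw [hnil] at hmem
            simp at hmem
          have hmin1 : (j :: (pvRanks ks rest).filter
              (fun i : Nat => decide ((i : Int) < bi))).min? = some j := by
            refine List.min?_eq_some_iff.mpr ⟨List.mem_cons_self .., ?_⟩
            intro b hb
            rcases List.mem_cons.mp hb with hb | hb
            · omega
            · have hb' := List.mem_filter.mp hb
              have := hempty b hb'.1
              omega
          rw [hmin1]
          show ((j : Int), some f)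
              = ((j : Int), List.find? (fun f => pvRank ks f == some j) (f :: rest))
          rw [List.find?_cons_of_pos (by simp [hr])]
      · have hstep' : pvBStep prio (bi, bp) f = (bi, bp) := by
          rw [hstep]; exact if_neg hlt
        rw [hstep', ih bi bp]
        have hfilter : (j :: pvRanks ks rest).filter (fun i : Nat => decide ((i : Int) < bi))
            = (pvRanks ks rest).filter (fun i : Nat => decide ((i : Int) < bi)) := by
          simp [hlt]
        rw [hfilter]
        cases hm : ((pvRanks ks rest).filter (fun i : Nat => decide ((i : Int) < bi))).min? with
        | none => rfl
        | some i =>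
          have hi_mem := (List.min?_eq_some_iff.mp hm).1
          have hi' := List.mem_filter.mp hi_mem
          have hibj : (i : Int) < bi := by simpa using hi'.2
          show ((i : Int), List.find? (fun f => pvRank ks f == some i) rest)
              = ((i : Int), List.find? (fun f => pvRank ks f == some i) (f :: rest))
          rw [List.find?_cons_of_neg (by simp [hr, beq_iff_eq]; omega)]

theorem pvB_eq_ref (files : List String) (pd : List (String × String)) :
    select_file_for_each_version_alt files pd = pvRef files (pd.map Prod.fst) := by
  have hp : ∀ s,
      ((PySem.List.enumerate (pd.map Prod.fst) 0).foldl
          (fun d ip => if d.contains ip.2 then d else d.insert ip.2 ip.1)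
          PySem.Dict.empty).get? s
        = (PySem.List.index? (pd.map Prod.fst) s).map (fun n : Nat => (n : Int)) := by
    intro s
    have h := pv_prio_get (pd.map Prod.fst) 0 PySem.Dict.empty s
    simpa [PySem.Dict.contains_empty, PySem.Dict.get?_empty] using h
  show (files.foldl (pvBStep _) ((pd.length : Int), none)).2 = _
  rw [pvB_fold _ (pd.map Prod.fst) hp files (pd.length : Int) none]
  have hfilter : (pvRanks (pd.map Prod.fst) files).filter
      (fun i : Nat => decide ((i : Int) < (pd.length : Int))) = pvRanks (pd.map Prod.fst) files := by
    refine List.filter_eq_self.mpr ?_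
    intro i hi
    obtain ⟨f, hf, hrank⟩ := List.mem_filterMap.mp hi
    unfold pvRank at hrank
    by_cases hv : validWebjs f = true
    · rw [if_pos hv] at hrank
      have hlen := (PySem.List.getElem_of_index?_eq_some hrank).1
      have : i < pd.length := by simpa using hlen
      simp only [decide_eq_true_eq]
      exact_mod_cast this
    · simp [hv] at hrank
  rw [hfilter]
  unfold pvRef
  cases hm : (pvRanks (pd.map Prod.fst) files).min? with
  | none => rfl
  | some i => rfl

-- ===== VERDICT (by name: the statement is the Claim_ definition above) =====
theorem select_file_for_each_version_spec : Claim_equal_select_file_for_each_version := by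
  intro files pd _
  unfold Spec_select_file_for_each_version
  rw [pvA_eq_ref, pvB_eq_ref]
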